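-- pv_equiv track=rewrite | github.com/krishna-ji/timetable-engine | src/io/export/schedule_views.py | _build_color_map
-- ===== SOURCE A (Python) =====
-- _THEORY_COLORS = [
--     "#A8C6FA",
--     "#B5D8B5",
--     "#C4B7D7",
--     "#F9D7A0",
--     "#A8E0D1",
--     "#D4C5F9",
--     "#B8DFF0",
--     "#C9E8B2",
-- ]
--
-- _PRACTICAL_COLORS = [
--     "#F4A6A0",
--     "#F2C6A0",
--     "#F7B7D2",
--     "#E6A8D7",
--     "#F0B8B8",
--     "#F5C7B8",
-- ]
--
-- def _build_color_map(
--     course_ids: set[tuple[str, str]],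
-- ) -> dict[str, str]:
--     """Assign distinct pastel colours per course, separated by type."""
--     cmap: dict[str, str] = {}
--     ti, pi = 0, 0
--     for label, ctype in sorted(course_ids):
--         if ctype == "practical" or "(PR)" in label:
--             cmap[label] = _PRACTICAL_COLORS[pi % len(_PRACTICAL_COLORS)]
--             pi += 1
--         else:
--             cmap[label] = _THEORY_COLORS[ti % len(_THEORY_COLORS)]
--             ti += 1
--     return cmap
-- ===== SOURCE B (Python) =====
-- _THEORY_COLORS = [
--     "#A8C6FA",
--     "#B5D8B5",
--     "#C4B7D7",
--     "#F9D7A0",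
--     "#A8E0D1",
--     "#D4C5F9",
--     "#B8DFF0",
--     "#C9E8B2",
-- ]
--
-- _PRACTICAL_COLORS = [
--     "#F4A6A0",
--     "#F2C6A0",
--     "#F7B7D2",
--     "#E6A8D7",
--     "#F0B8B8",
--     "#F5C7B8",
-- ]
--
--
-- def _is_practical(item):
--     label, ctype = item
--     return ctype == "practical" or "(PR)" in label
--
--
-- def _build_color_map(course_ids):
--     items = sorted(course_ids)
--     practical = [it for it in items if _is_practical(it)]
--     theory = [it for it in items if not _is_practical(it)]
--     prac_map = {
--         it: _PRACTICAL_COLORS[i % len(_PRACTICAL_COLORS)]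
--         for i, it in enumerate(practical)
--     }
--     theory_map = {
--         it: _THEORY_COLORS[i % len(_THEORY_COLORS)]
--         for i, it in enumerate(theory)
--     }
--     return {
--         label: (prac_map if _is_practical((label, ctype)) else theory_map)[(label, ctype)]
--         for label, ctype in items
--     }
-- ===== Notes on version B (the rewrite author's own statement) =====
-- stated objective: alternative
-- what changed: Replaces the single stateful pass with two mutable counters by a partition of the sorted items into practical/theory sublists, two precomputed label->color tables built by enumerate over each sublist, and a final stateless pass over the sorted items that looks colors up in those tables.
import Mathlib
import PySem

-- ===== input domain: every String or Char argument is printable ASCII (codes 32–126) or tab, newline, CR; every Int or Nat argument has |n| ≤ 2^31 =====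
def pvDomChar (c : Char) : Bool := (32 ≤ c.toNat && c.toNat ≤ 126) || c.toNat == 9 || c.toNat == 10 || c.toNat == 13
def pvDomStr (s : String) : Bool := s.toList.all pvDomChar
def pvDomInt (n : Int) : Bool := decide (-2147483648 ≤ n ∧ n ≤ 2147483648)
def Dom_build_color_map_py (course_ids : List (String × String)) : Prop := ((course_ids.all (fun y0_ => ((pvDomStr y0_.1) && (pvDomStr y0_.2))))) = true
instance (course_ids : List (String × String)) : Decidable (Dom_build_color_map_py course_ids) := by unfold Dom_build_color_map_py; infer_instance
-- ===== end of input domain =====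

-- B replaces A's single stateful counter loop by partition + two enumerate-built lookup tables + a stateless final pass; same cost, proved equal on distinct-pair inputs (the Python parameter is a set).


-- ===== PORT A =====
def pvTheoryColors : List String :=
  ["#A8C6FA", "#B5D8B5", "#C4B7D7", "#F9D7A0", "#A8E0D1", "#D4C5F9", "#B8DFF0", "#C9E8B2"]

def pvPracticalColors : List String :=
  ["#F4A6A0", "#F2C6A0", "#F7B7D2", "#E6A8D7", "#F0B8B8", "#F5C7B8"]

-- the loop body of A: state (cmap, ti, pi), branch order as in the Python
def build_color_map_py_step (st : PySem.Dict String String × Nat × Nat) (it : String × String) :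
    PySem.Dict String String × Nat × Nat :=
  if it.2 == "practical" || PySem.Str.isIn "(PR)" it.1 then
    (st.1.insert it.1 (pvPracticalColors.getD (st.2.2 % pvPracticalColors.length) ""), st.2.1, st.2.2 + 1)
  else
    (st.1.insert it.1 (pvTheoryColors.getD (st.2.1 % pvTheoryColors.length) ""), st.2.1 + 1, st.2.2)

def build_color_map_py (course_ids : List (String × String)) : List (String × String) :=
  ((PySem.List.sorted2 course_ids (fun it => it.1) (fun it => it.2)).foldl
      build_color_map_py_step (PySem.Dict.empty, 0, 0)).1.items

-- ===== PORT B =====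
def pvIsPractical (it : String × String) : Bool :=
  it.2 == "practical" || PySem.Str.isIn "(PR)" it.1

-- the dict comprehension {it: pal[i % len(pal)] for i, it in enumerate(lst)}
def pvColorTable (pal : List String) (lst : List (String × String)) :
    PySem.Dict (String × String) String :=
  (PySem.List.enumerate lst).foldl
    (fun d p => d.insert p.2 (pal.getD (p.1.toNat % pal.length) "")) PySem.Dict.empty

def build_color_map_py_alt (course_ids : List (String × String)) : List (String × String) :=
  let items := PySem.List.sorted2 course_ids (fun it => it.1) (fun it => it.2)
  let practical := items.filter pvIsPractical
  let theory := items.filter (fun it => !pvIsPractical it)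
  let pracMap := pvColorTable pvPracticalColors practical
  let theoryMap := pvColorTable pvTheoryColors theory
  (items.foldl
      (fun d it => d.insert it.1 ((if pvIsPractical it then pracMap else theoryMap).getD it ""))
      PySem.Dict.empty).items

-- ===== PRECONDITION & SPEC =====
-- Pre_ states the set convention: the Python parameter is a set[tuple[str, str]], so the list holds
-- DISTINCT pairs; on a list with an exactly-duplicated pair (not a set) the per-occurrence colors are
-- an accident of dict-overwrite order, and such lists are excluded.
def Pre_build_color_map_py (course_ids : List (String × String)) : Prop := course_ids.Nodup
instance (course_ids : List (String × String)) : Decidable (Pre_build_color_map_py course_ids) := by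
  unfold Pre_build_color_map_py; infer_instance

def pvWitness_build_color_map_py : (List (String × String)) :=
  [("Math (PR)", "theory"), ("Math", "theory"), ("Chem", "practical")]

def Spec_build_color_map_py (course_ids : List (String × String)) (out : List (String × String)) : Prop :=
  out = build_color_map_py_alt course_ids
instance (course_ids : List (String × String)) (out : List (String × String)) :
    Decidable (Spec_build_color_map_py course_ids out) := by
  unfold Spec_build_color_map_py; infer_instance

-- ===== CLAIM (what is proved, stated in full; the proofs are below) =====
def Claim_equal_build_color_map_py : Prop :=
  ∀ (course_ids : List (String × String)), Dom_build_color_map_py course_ids →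
    Pre_build_color_map_py course_ids →
    Spec_build_color_map_py course_ids (build_color_map_py course_ids)

-- ===== LEMMAS AND PROOFS =====

-- a color table over a duplicate-free list answers, at the j-th list element, the j-th cycling color
lemma pvColorTable_getD (pal : List String) (lst : List (String × String)) (hnd : lst.Nodup)
    (j : Nat) (x : String × String) (h : lst[j]? = some x) :
    (pvColorTable pal lst).getD x "" = pal.getD (j % pal.length) "" := by
  obtain ⟨hj, hx⟩ := List.getElem?_eq_some_iff.mp h
  have hitems : (pvColorTable pal lst).items =
      PySem.Dict.empty.items ++ (PySem.List.enumerate lst).map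
        (fun p => (p.2, pal.getD (p.1.toNat % pal.length) "")) := by
    apply PySem.Dict.items_foldl_insert_fresh
    · intro a _; exact PySem.Dict.contains_empty _
    · rw [PySem.List.map_snd_enumerate]; exact hnd
  have hempty : (PySem.Dict.empty : PySem.Dict (String × String) String).items = [] := rfl
  have hkeys : (pvColorTable pal lst).keys = lst := by
    show (pvColorTable pal lst).items.map (·.1) = lst
    rw [hitems, hempty, List.nil_append, List.map_map]
    exact PySem.List.map_snd_enumerate lst 0
  have hmem : (x, pal.getD (j % pal.length) "") ∈ (pvColorTable pal lst).items := by
    rw [hitems, hempty, List.nil_append]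
    refine List.mem_map.mpr ⟨((0 : Int) + j, x), ?_, ?_⟩
    · exact (PySem.List.mem_enumerate_iff _ _ _).mpr ⟨j, hj, by rw [← hx]⟩
    · show (x, pal.getD (((0 : Int) + j).toNat % pal.length) "") = _
      norm_num
  exact PySem.Dict.getD_of_mem_items _ hmem (by rw [hkeys]; exact hnd) ""

-- A's counter loop equals B's stateless lookup pass, provided the tables answer the cycling colors
-- at every position of the respective filtered sublists (counters generalized to start at ti, pi)
lemma pv_loop_eq (pm tm : PySem.Dict (String × String) String)
    (s : List (String × String)) :
    ∀ (cmap : PySem.Dict String String) (ti pi : Nat),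
    (∀ (j : Nat) (x : String × String), (s.filter pvIsPractical)[j]? = some x →
      pm.getD x "" = pvPracticalColors.getD ((pi + j) % pvPracticalColors.length) "") →
    (∀ (j : Nat) (x : String × String), (s.filter (fun it => !pvIsPractical it))[j]? = some x →
      tm.getD x "" = pvTheoryColors.getD ((ti + j) % pvTheoryColors.length) "") →
    (s.foldl build_color_map_py_step (cmap, ti, pi)).1 =
      s.foldl (fun d it => d.insert it.1 ((if pvIsPractical it then pm else tm).getD it "")) cmap := by
  induction s with
  | nil => intro cmap ti pi _ _; rfl
  | cons a rest ih =>
    intro cmap ti pi hp ht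
    by_cases hpa : pvIsPractical a = true
    · have hf : (a :: rest).filter pvIsPractical = a :: rest.filter pvIsPractical := by
        simp [hpa]
      have hcond : (a.2 == "practical" || PySem.Str.isIn "(PR)" a.1) = true := hpa
      have hstep : build_color_map_py_step (cmap, ti, pi) a =
          (cmap.insert a.1 (pvPracticalColors.getD (pi % pvPracticalColors.length) ""), ti, pi + 1) := by
        simp only [build_color_map_py_step, hcond]
        rfl
      have hval : (if pvIsPractical a then pm else tm).getD a "" =
          pvPracticalColors.getD (pi % pvPracticalColors.length) "" := by
        have h0 := hp 0 a (by rw [hf]; rfl)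
        rw [if_pos hpa]
        simpa using h0
      simp only [List.foldl_cons, hstep, hval]
      apply ih
      · intro j x hx
        have h := hp (j + 1) x (by rw [hf]; simpa using hx)
        simpa [Nat.add_assoc, Nat.add_comm 1 j] using h
      · intro j x hx
        refine ht j x ?_
        simpa [hpa] using hx
    · have hpa' : pvIsPractical a = false := by simpa using hpa
      have hfn : (a :: rest).filter (fun it => !pvIsPractical it) =
          a :: rest.filter (fun it => !pvIsPractical it) := by
        simp [hpa']
      have hcond : (a.2 == "practical" || PySem.Str.isIn "(PR)" a.1) = false := hpa'
      have hstep : build_color_map_py_step (cmap, ti, pi) a =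
          (cmap.insert a.1 (pvTheoryColors.getD (ti % pvTheoryColors.length) ""), ti + 1, pi) := by
        simp only [build_color_map_py_step, hcond]
        rfl
      have hval : (if pvIsPractical a then pm else tm).getD a "" =
          pvTheoryColors.getD (ti % pvTheoryColors.length) "" := by
        have h0 := ht 0 a (by rw [hfn]; rfl)
        rw [if_neg hpa]
        simpa using h0
      simp only [List.foldl_cons, hstep, hval]
      apply ih
      · intro j x hx
        refine hp j x ?_
        simpa [hpa'] using hx
      · intro j x hx
        have h := ht (j + 1) x (by rw [hfn]; simpa using hx)
        simpa [Nat.add_assoc, Nat.add_comm 1 j] using h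

-- ===== VERDICT (by name: the statement is the Claim_ definition above) =====
theorem build_color_map_py_spec : Claim_equal_build_color_map_py := by
  intro course_ids _ hnd
  unfold Spec_build_color_map_py build_color_map_py build_color_map_py_alt
  set s := PySem.List.sorted2 course_ids (fun it => it.1) (fun it => it.2) with hs
  have hsnd : s.Nodup := ((PySem.List.sorted2_perm course_ids _ _ false).nodup_iff).mpr hnd
  apply congrArg PySem.Dict.items
  apply pv_loop_eq
  · intro j x hx
    have := pvColorTable_getD pvPracticalColors (s.filter pvIsPractical)
      (hsnd.filter _) j x hx
    simpa using this
  · intro j x hx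
    have := pvColorTable_getD pvTheoryColors (s.filter (fun it => !pvIsPractical it))
      (hsnd.filter _) j x hx
    simpa using this
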